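-- pv_equiv track=rewrite | github.com/MatheusANBS/NETEX_WEB | Modulação/cortes.py | agrupar_resultados
-- ===== SOURCE A (Python) =====
-- def agrupar_resultados(lista):
--     agrupados = {}
--     for qtd, cortes, desperdicio in lista:
--         chave = tuple(sorted(cortes.items()))
--         if chave not in agrupados:
--             agrupados[chave] = [0, cortes, desperdicio, 0]
--         agrupados[chave][0] += qtd
--         agrupados[chave][3] += desperdicio
--     return [(v[0], v[1], v[2]) for v in agrupados.values()]
-- ===== SOURCE B (Python) =====
-- def agrupar_resultados(lista):
--     # Partition algorithm: repeatedly take the first remaining entry, sum the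
--     # quantities of ALL remaining entries with an equal cut-dict (plain dict ==)
--     # in one sweep, emit the group, and continue on the filtered remainder.
--     resultado = []
--     restantes = list(lista)
--     while restantes:
--         qtd, cortes, desperdicio = restantes[0]
--         total = qtd + sum(q for q, c, _ in restantes[1:] if c == cortes)
--         resultado.append((total, cortes, desperdicio))
--         restantes = [t for t in restantes[1:] if t[1] != cortes]
--     return resultado
-- ===== Notes on version B (the rewrite author's own statement) =====
-- stated objective: alternative
-- what changed: B replaces A's single left-to-right pass with a dict keyed by canonical sorted-item tuples by a partition algorithm: it repeatedly takes the first remaining entry, sums the quantities of all remaining entries whose cut-dict is == to it in one sweep, emits that finished group, and recurses on the filtered remainder, so each group is completed before the next one is started.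
import Mathlib
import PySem

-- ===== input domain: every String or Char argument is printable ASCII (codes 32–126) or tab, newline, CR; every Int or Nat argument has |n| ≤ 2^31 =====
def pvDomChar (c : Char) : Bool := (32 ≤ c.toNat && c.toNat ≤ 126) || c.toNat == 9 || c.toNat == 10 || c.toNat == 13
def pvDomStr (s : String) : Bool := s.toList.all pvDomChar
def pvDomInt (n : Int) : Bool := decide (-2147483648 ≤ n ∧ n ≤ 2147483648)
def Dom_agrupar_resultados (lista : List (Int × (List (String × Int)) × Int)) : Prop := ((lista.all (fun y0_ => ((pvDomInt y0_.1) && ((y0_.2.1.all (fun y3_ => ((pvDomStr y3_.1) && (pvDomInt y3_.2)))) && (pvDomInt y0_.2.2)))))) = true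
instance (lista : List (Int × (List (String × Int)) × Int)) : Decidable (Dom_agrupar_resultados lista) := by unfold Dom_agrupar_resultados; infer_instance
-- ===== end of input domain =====

-- One honest line: B groups by a partition algorithm (take first entry, sum all
-- later ==-equal cut-dicts in one sweep, filter them out, repeat) instead of A's
-- single pass over a dict keyed by sorted-item tuples; same results.

-- ===== PORT A =====
-- tuple(sorted(cortes.items())): Python sorts (str, int) pairs lexicographically,
-- which is PySem.List.sorted with the lexicographic key 'toLex' on the pair.
def pvKeyOf (c : List (String × Int)) : List (String × Int) :=
  PySem.List.sorted c (fun p => toLex p) false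

-- loop body of A: the 'if chave not in' insert, then the two in-place '+=' on the entry
def pvStepA (ag : PySem.Dict (List (String × Int)) (Int × List (String × Int) × Int × Int))
    (t : Int × (List (String × Int)) × Int) :
    PySem.Dict (List (String × Int)) (Int × List (String × Int) × Int × Int) :=
  let chave := pvKeyOf t.2.1
  let ag1 := if ag.contains chave then ag else ag.insert chave (0, t.2.1, t.2.2, 0)
  ag1.modify chave (0, [], 0, 0) (fun v => (v.1 + t.1, v.2.1, v.2.2.1, v.2.2.2 + t.2.2))

def agrupar_resultados (lista : List (Int × (List (String × Int)) × Int)) :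
    List (Int × (List (String × Int)) × Int) :=
  let agrupados := lista.foldl pvStepA PySem.Dict.empty
  agrupados.values.map (fun v => (v.1, v.2.1, v.2.2.1))

-- ===== PORT B =====
-- Python's dict == : same number of entries and every key maps to the same value.
def pvDictEq (d1 d2 : List (String × Int)) : Bool :=
  (d1.length == d2.length) && d1.all (fun kv => (PySem.Dict.mk d2).get? kv.1 == some kv.2)

-- the while loop of B: emit the finished group for the first remaining entry,
-- continue on the remainder filtered of ==-equal cut-dicts
def pvLoopB (resultado : List (Int × (List (String × Int)) × Int)) :
    List (Int × (List (String × Int)) × Int) → List (Int × (List (String × Int)) × Int)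
  | [] => resultado
  | t :: rest =>
      pvLoopB
        (resultado ++
          [(t.1 + ((rest.filter (fun u => pvDictEq u.2.1 t.2.1)).map Prod.fst).sum,
            t.2.1, t.2.2)])
        (rest.filter (fun u => !pvDictEq u.2.1 t.2.1))
  termination_by l => l.length
  decreasing_by
    simp only [List.length_cons, List.length_unattach]
    exact Nat.lt_succ_of_le (le_trans (List.length_filter_le _ _) (by simp))

def agrupar_resultados_alt (lista : List (Int × (List (String × Int)) × Int)) :
    List (Int × (List (String × Int)) × Int) :=
  pvLoopB [] lista

-- ===== PRECONDITION & SPEC =====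
-- Pre_ only states that each 'cortes' association list is a valid encoding of a
-- Python dict (no duplicate keys): a duplicate-key list represents no Python input.
def Pre_agrupar_resultados (lista : List (Int × (List (String × Int)) × Int)) : Prop :=
  ∀ t ∈ lista, (t.2.1.map Prod.fst).Nodup
instance (lista : List (Int × (List (String × Int)) × Int)) : Decidable (Pre_agrupar_resultados lista) := by unfold Pre_agrupar_resultados; infer_instance

def pvWitness_agrupar_resultados : (List (Int × (List (String × Int)) × Int)) :=
  [(2, [("a", 1), ("b", 2)], 3), (1, [("b", 2), ("a", 1)], 5), (4, [("a", 1)], 0)]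

def Spec_agrupar_resultados (lista : List (Int × (List (String × Int)) × Int)) (out : List (Int × (List (String × Int)) × Int)) : Prop := out = agrupar_resultados_alt lista
instance (lista : List (Int × (List (String × Int)) × Int)) (out : List (Int × (List (String × Int)) × Int)) : Decidable (Spec_agrupar_resultados lista out) := by unfold Spec_agrupar_resultados; infer_instance

-- ===== CLAIM (what is proved, stated in full; the proofs are below) =====
def Claim_equal_agrupar_resultados : Prop := ∀ (lista : List (Int × (List (String × Int)) × Int)), Dom_agrupar_resultados lista → Pre_agrupar_resultados lista → Spec_agrupar_resultados lista (agrupar_resultados lista)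

-- ===== LEMMAS AND PROOFS =====

-- proof-side intermediate: a first-match linear scan, the bridge between A's
-- keyed accumulation and B's partition loop
def pvUpd (qtd : Int) (cortes : List (String × Int)) (desp : Int) :
    List (Int × (List (String × Int)) × Int) → List (Int × (List (String × Int)) × Int)
  | [] => [(qtd, cortes, desp)]
  | g :: rest =>
      if pvDictEq g.2.1 cortes then (g.1 + qtd, g.2.1, g.2.2) :: rest
      else g :: pvUpd qtd cortes desp rest

def pvScanImpl (lista : List (Int × (List (String × Int)) × Int)) :
    List (Int × (List (String × Int)) × Int) :=
  lista.foldl (fun grupos t => pvUpd t.1 t.2.1 t.2.2 grupos) []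

-- projection from a dict entry of A to the emitted triple
def pvOutA (p : List (String × Int) × (Int × List (String × Int) × Int × Int)) :
    Int × (List (String × Int)) × Int := (p.2.1, p.2.2.1, p.2.2.2.1)

theorem pvKeyOf_eq_iff_perm (c1 c2 : List (String × Int)) :
    pvKeyOf c1 = pvKeyOf c2 ↔ c1.Perm c2 := by
  constructor
  · intro h
    have h1 := (PySem.List.sorted_perm c1 (fun p => toLex p) false).symm
    rw [show PySem.List.sorted c1 (fun p => toLex p) false = pvKeyOf c1 from rfl, h] at h1
    exact h1.trans (PySem.List.sorted_perm c2 (fun p => toLex p) false)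
  · intro h
    exact PySem.List.sorted_eq_sorted_of_perm c1 c2 (fun p => toLex p) toLex.injective h

theorem pvDictEq_iff_perm (c1 c2 : List (String × Int))
    (h1 : (c1.map Prod.fst).Nodup) (h2 : (c2.map Prod.fst).Nodup) :
    pvDictEq c1 c2 = true ↔ c1.Perm c2 := by
  constructor
  · intro h
    simp only [pvDictEq, Bool.and_eq_true, beq_iff_eq, List.all_eq_true] at h
    obtain ⟨hlen, hall⟩ := h
    refine (List.Nodup.subperm (List.Nodup.of_map Prod.fst h1) ?_).perm_of_length_le
      (le_of_eq hlen.symm)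
    intro kv hkv
    have hm := PySem.Dict.mem_items_of_get?_eq_some (PySem.Dict.mk c2) (hall kv hkv)
    simpa using hm
  · intro hp
    simp only [pvDictEq, Bool.and_eq_true, beq_iff_eq, List.all_eq_true]
    refine ⟨hp.length_eq, ?_⟩
    intro kv hkv
    have hm : (kv.1, kv.2) ∈ (PySem.Dict.mk c2).items := by simpa using hp.subset hkv
    have hk2 : (PySem.Dict.mk c2).keys.Nodup := by simpa [PySem.Dict.keys] using h2
    simp [PySem.Dict.get?_of_mem_items _ hm hk2]

theorem pvDictEq_iff_key (c1 c2 : List (String × Int))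
    (h1 : (c1.map Prod.fst).Nodup) (h2 : (c2.map Prod.fst).Nodup) :
    pvDictEq c1 c2 = true ↔ pvKeyOf c1 = pvKeyOf c2 := by
  rw [pvDictEq_iff_perm c1 c2 h1 h2, pvKeyOf_eq_iff_perm]

theorem pvDictEq_symm (c1 c2 : List (String × Int))
    (h1 : (c1.map Prod.fst).Nodup) (h2 : (c2.map Prod.fst).Nodup) :
    pvDictEq c1 c2 = pvDictEq c2 c1 := by
  by_cases hp : c1.Perm c2
  · rw [(pvDictEq_iff_perm c1 c2 h1 h2).mpr hp, (pvDictEq_iff_perm c2 c1 h2 h1).mpr hp.symm]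
  · have e1 : pvDictEq c1 c2 = false := by
      cases h : pvDictEq c1 c2
      · rfl
      · exact absurd ((pvDictEq_iff_perm c1 c2 h1 h2).mp h) hp
    have e2 : pvDictEq c2 c1 = false := by
      cases h : pvDictEq c2 c1
      · rfl
      · exact absurd ((pvDictEq_iff_perm c2 c1 h2 h1).mp h).symm hp
    rw [e1, e2]

-- invariant tying A's dict to the scan's group list
def pvInv (ag : PySem.Dict (List (String × Int)) (Int × List (String × Int) × Int × Int))
    (grupos : List (Int × (List (String × Int)) × Int)) : Prop :=
  ag.items.map pvOutA = grupos ∧ ag.keys.Nodup ∧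
    ∀ p ∈ ag.items, p.1 = pvKeyOf p.2.2.1 ∧ (p.2.2.1.map Prod.fst).Nodup

theorem pvUpd_no_match (q : Int) (c : List (String × Int)) (d : Int)
    (grupos : List (Int × (List (String × Int)) × Int))
    (h : ∀ g ∈ grupos, pvDictEq g.2.1 c = false) :
    pvUpd q c d grupos = grupos ++ [(q, c, d)] := by
  induction grupos with
  | nil => rfl
  | cons g rest ih =>
      simp only [pvUpd, h g (List.mem_cons_self), Bool.false_eq_true, if_false]
      simp [ih (fun g' hg' => h g' (List.mem_cons_of_mem _ hg'))]

theorem pvScan (chave : List (String × Int)) (q : Int) (c : List (String × Int)) (dd : Int)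
    (hc : (c.map Prod.fst).Nodup) (hch : chave = pvKeyOf c)
    (l : List (List (String × Int) × (Int × List (String × Int) × Int × Int)))
    (hkeys : (l.map Prod.fst).Nodup)
    (hent : ∀ p ∈ l, p.1 = pvKeyOf p.2.2.1 ∧ (p.2.2.1.map Prod.fst).Nodup)
    (v' : Int × List (String × Int) × Int × Int)
    (hv : ∀ p ∈ l, p.1 = chave → pvOutA (chave, v') = (p.2.1 + q, p.2.2.1, p.2.2.2.1))
    (hmem : chave ∈ l.map Prod.fst) :
    (l.map (fun p => if p.1 == chave then (chave, v') else p)).map pvOutA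
      = pvUpd q c dd (l.map pvOutA) := by
  induction l with
  | nil => simp at hmem
  | cons p l ih =>
      obtain ⟨hpk, hpn⟩ := hent p (List.mem_cons_self)
      by_cases hp : p.1 = chave
      · have heq : pvDictEq p.2.2.1 c = true := by
          rw [pvDictEq_iff_key _ _ hpn hc, ← hpk, hp, hch]
        have htail : ∀ p' ∈ l, p'.1 ≠ chave := by
          intro p' hp' hne
          have : p.1 ∈ l.map Prod.fst := by
            rw [hp, ← hne]; exact List.mem_map_of_mem hp'
          exact (List.nodup_cons.mp hkeys).1 this
        have hid : l.map (fun p' => if (p'.1 == chave) = true then (chave, v') else p') = l := by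
          conv_rhs => rw [← List.map_id l]
          apply List.map_congr_left
          intro p' hp'
          simp [htail p' hp']
        have hb : (p.1 == chave) = true := beq_iff_eq.mpr hp
        simp only [List.map_cons, hb, if_true, hid, pvUpd]
        simp only [pvOutA] at heq ⊢
        simp only [heq, if_true]
        rw [show pvOutA (chave, v') = (v'.1, v'.2.1, v'.2.2.1) from rfl] at hv
        rw [hv p (List.mem_cons_self) hp]
      · have hne : pvDictEq p.2.2.1 c = false := by
          by_contra hcon
          have ht : pvDictEq p.2.2.1 c = true := by
            revert hcon; cases pvDictEq p.2.2.1 c <;> simp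
          rw [pvDictEq_iff_key _ _ hpn hc] at ht
          exact hp (by rw [hpk, ht, ← hch])
        have hmem' : chave ∈ l.map Prod.fst := by
          rcases List.mem_cons.mp hmem with h | h
          · exact absurd h.symm hp
          · exact h
        have hb : (p.1 == chave) = false := by simp [hp]
        have ihr := ih (List.nodup_cons.mp hkeys).2
          (fun p' hp' => hent p' (List.mem_cons_of_mem _ hp'))
          (fun p' hp' => hv p' (List.mem_cons_of_mem _ hp')) hmem'
        simp only [List.map_cons, hb, Bool.false_eq_true, if_false, pvUpd]
        simp only [pvOutA] at hne ⊢
        simp only [hne, Bool.false_eq_true, if_false, ihr]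

theorem pvStep_inv (ag : PySem.Dict (List (String × Int)) (Int × List (String × Int) × Int × Int))
    (grupos : List (Int × (List (String × Int)) × Int))
    (t : Int × (List (String × Int)) × Int)
    (ht : (t.2.1.map Prod.fst).Nodup) (hinv : pvInv ag grupos) :
    pvInv (pvStepA ag t) (pvUpd t.1 t.2.1 t.2.2 grupos) := by
  obtain ⟨hmap, hnd, hent⟩ := hinv
  have hk : ag.keys = ag.items.map Prod.fst := rfl
  by_cases hcon : ag.contains (pvKeyOf t.2.1) = true
  · -- key already present: A rewrites the entry in place, the scan updates the first match
    have hmem : pvKeyOf t.2.1 ∈ ag.items.map Prod.fst := by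
      rw [← hk]; exact (PySem.Dict.contains_iff_mem_keys ag _).mp hcon
    have hitems : (pvStepA ag t).items =
        ag.items.map (fun p => if (p.1 == pvKeyOf t.2.1) = true then
          (pvKeyOf t.2.1, ((ag.getD (pvKeyOf t.2.1) (0, [], 0, 0)).1 + t.1,
            (ag.getD (pvKeyOf t.2.1) (0, [], 0, 0)).2.1,
            (ag.getD (pvKeyOf t.2.1) (0, [], 0, 0)).2.2.1,
            (ag.getD (pvKeyOf t.2.1) (0, [], 0, 0)).2.2.2 + t.2.2)) else p) := by
      simp only [pvStepA, hcon, if_true, PySem.Dict.modify]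
      exact PySem.Dict.items_insert_of_contains ag _ hcon
    refine ⟨?_, ?_, ?_⟩
    · rw [hitems, ← hmap]
      apply pvScan (pvKeyOf t.2.1) t.1 t.2.1 t.2.2 ht rfl ag.items (hk ▸ hnd) hent _ ?_ hmem
      intro p hp hpc
      have hpm : (pvKeyOf t.2.1, p.2) ∈ ag.items := by rw [← hpc]; simpa using hp
      rw [PySem.Dict.getD_of_mem_items ag hpm hnd]
      rfl
    · rw [show (pvStepA ag t).keys = (pvStepA ag t).items.map Prod.fst from rfl, hitems,
        List.map_map]
      have hcongr : ∀ p ∈ ag.items, (Prod.fst ∘ (fun p => if (p.1 == pvKeyOf t.2.1) = true then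
          (pvKeyOf t.2.1, ((ag.getD (pvKeyOf t.2.1) (0, [], 0, 0)).1 + t.1,
            (ag.getD (pvKeyOf t.2.1) (0, [], 0, 0)).2.1,
            (ag.getD (pvKeyOf t.2.1) (0, [], 0, 0)).2.2.1,
            (ag.getD (pvKeyOf t.2.1) (0, [], 0, 0)).2.2.2 + t.2.2)) else p)) p = Prod.fst p := by
        intro p hp
        by_cases hpc : p.1 = pvKeyOf t.2.1
        · simp [Function.comp, hpc]
        · simp [Function.comp, hpc]
      rw [List.map_congr_left hcongr]
      exact hk ▸ hnd
    · intro p' hp'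
      rw [hitems] at hp'
      obtain ⟨p, hp, rfl⟩ := List.mem_map.mp hp'
      by_cases hpc : p.1 = pvKeyOf t.2.1
      · obtain ⟨hk1, hk2⟩ := hent p hp
        have hpm : (pvKeyOf t.2.1, p.2) ∈ ag.items := by rw [← hpc]; simpa using hp
        have hgd : ag.getD (pvKeyOf t.2.1) (0, [], 0, 0) = p.2 :=
          PySem.Dict.getD_of_mem_items ag hpm hnd _
        simp only [hpc, beq_self_eq_true, if_true, hgd]
        exact ⟨by rw [← hpc, hk1], hk2⟩
      · simp only [beq_iff_eq, hpc, if_false]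
        exact hent p hp
  · -- fresh key: A appends a new entry, the scan appends a new group
    have hnotmem : pvKeyOf t.2.1 ∉ ag.items.map Prod.fst := by
      rw [← hk]; intro h
      exact hcon ((PySem.Dict.contains_iff_mem_keys ag _).mpr h)
    have hcon' : ag.contains (pvKeyOf t.2.1) = false := by
      revert hcon; cases ag.contains (pvKeyOf t.2.1) <;> simp
    have hi1 : (ag.insert (pvKeyOf t.2.1) (0, t.2.1, t.2.2, 0)).items =
        ag.items ++ [(pvKeyOf t.2.1, (0, t.2.1, t.2.2, 0))] :=
      PySem.Dict.items_insert_of_not_contains ag _ hcon'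
    have hitems : (pvStepA ag t).items =
        ag.items ++ [(pvKeyOf t.2.1, (0 + t.1, t.2.1, t.2.2, 0 + t.2.2))] := by
      simp only [pvStepA, hcon', Bool.false_eq_true, if_false, PySem.Dict.modify]
      rw [PySem.Dict.getD_insert_self,
        PySem.Dict.items_insert_of_contains _ _
          (PySem.Dict.contains_insert_self ag (pvKeyOf t.2.1) _), hi1, List.map_append]
      congr 1
      · conv_rhs => rw [← List.map_id ag.items]
        apply List.map_congr_left
        intro p hp
        have : p.1 ≠ pvKeyOf t.2.1 := fun h => hnotmem (h ▸ List.mem_map_of_mem hp)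
        simp [this]
      · simp
    have hnomatch : ∀ g ∈ grupos, pvDictEq g.2.1 t.2.1 = false := by
      intro g hg
      rw [← hmap] at hg
      obtain ⟨p, hp, rfl⟩ := List.mem_map.mp hg
      obtain ⟨hk1, hk2⟩ := hent p hp
      by_contra hcg
      have ht' : pvDictEq (pvOutA p).2.1 t.2.1 = true := by
        revert hcg; cases pvDictEq (pvOutA p).2.1 t.2.1 <;> simp
      have : pvKeyOf p.2.2.1 = pvKeyOf t.2.1 :=
        (pvDictEq_iff_key _ _ hk2 ht).mp ht'
      exact hnotmem (this ▸ hk1 ▸ List.mem_map_of_mem hp)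
    refine ⟨?_, ?_, ?_⟩
    · rw [hitems, List.map_append, hmap, pvUpd_no_match _ _ _ _ hnomatch]
      simp [pvOutA]
    · rw [show (pvStepA ag t).keys = (pvStepA ag t).items.map Prod.fst from rfl, hitems,
        List.map_append]
      rw [List.nodup_append]
      refine ⟨hk ▸ hnd, List.nodup_singleton _, ?_⟩
      intro k hk1 k2 hk2
      rw [List.map_singleton, List.mem_singleton] at hk2
      subst hk2
      intro h
      have hke : k = pvKeyOf t.2.1 := h
      rw [hke] at hk1
      exact hnotmem hk1
    · intro p' hp'
      rw [hitems] at hp'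
      rcases List.mem_append.mp hp' with h | h
      · exact hent p' h
      · simp only [List.mem_singleton] at h
        subst h
        exact ⟨rfl, ht⟩

theorem pvFold_inv (lista : List (Int × (List (String × Int)) × Int))
    (ag : PySem.Dict (List (String × Int)) (Int × List (String × Int) × Int × Int))
    (grupos : List (Int × (List (String × Int)) × Int))
    (hl : ∀ t ∈ lista, (t.2.1.map Prod.fst).Nodup) (hinv : pvInv ag grupos) :
    pvInv (lista.foldl pvStepA ag)
      (lista.foldl (fun grupos t => pvUpd t.1 t.2.1 t.2.2 grupos) grupos) := by
  induction lista generalizing ag grupos with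
  | nil => exact hinv
  | cons t rest ih =>
      exact ih _ _ (fun u hu => hl u (List.mem_cons_of_mem _ hu))
        (pvStep_inv ag grupos t (hl t (List.mem_cons_self)) hinv)

-- ===== bridge: the first-match scan equals B's partition loop =====

-- peeling the head group out of the scan fold
theorem pvHeadSplit (l : List (Int × (List (String × Int)) × Int))
    (hl : ∀ t ∈ l, (t.2.1.map Prod.fst).Nodup) :
    ∀ (gs : List (Int × (List (String × Int)) × Int)) (q : Int)
      (c : List (String × Int)) (d : Int), (c.map Prod.fst).Nodup →
    l.foldl (fun grupos t => pvUpd t.1 t.2.1 t.2.2 grupos) ((q, c, d) :: gs)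
      = (q + ((l.filter (fun u => pvDictEq u.2.1 c)).map Prod.fst).sum, c, d)
        :: (l.filter (fun u => !pvDictEq u.2.1 c)).foldl
            (fun grupos t => pvUpd t.1 t.2.1 t.2.2 grupos) gs := by
  induction l with
  | nil => intro gs q c d _; simp
  | cons t rest ih =>
      intro gs q c d hc
      have htn := hl t (List.mem_cons_self)
      have hrest := fun u hu => hl u (List.mem_cons_of_mem _ hu)
      have hsymm : pvDictEq c t.2.1 = pvDictEq t.2.1 c := pvDictEq_symm _ _ hc htn
      by_cases hm : pvDictEq t.2.1 c = true
      · have hcm : pvDictEq c t.2.1 = true := by rw [hsymm, hm]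
        simp only [List.foldl_cons, pvUpd, hcm, if_true, List.filter_cons, hm,
          Bool.not_true, Bool.false_eq_true, if_false, if_true, List.map_cons, List.sum_cons]
        rw [ih hrest gs (q + t.1) c d hc]
        ring_nf
      · have hm' : pvDictEq t.2.1 c = false := by
          revert hm; cases pvDictEq t.2.1 c <;> simp
        have hcm : pvDictEq c t.2.1 = false := by rw [hsymm, hm']
        simp only [List.foldl_cons, pvUpd, hcm, Bool.false_eq_true, if_false,
          List.filter_cons, hm', Bool.not_false, if_true]
        rw [ih hrest (pvUpd t.1 t.2.1 t.2.2 gs) q c d hc]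

theorem pvLoopB_eq (n : ℕ) : ∀ (l res : List (Int × (List (String × Int)) × Int)),
    l.length ≤ n → (∀ t ∈ l, (t.2.1.map Prod.fst).Nodup) →
    pvLoopB res l = res ++ l.foldl (fun grupos t => pvUpd t.1 t.2.1 t.2.2 grupos) [] := by
  induction n with
  | zero =>
      intro l res hlen _
      have : l = [] := List.eq_nil_of_length_eq_zero (Nat.le_zero.mp hlen)
      subst this; simp [pvLoopB]
  | succ n ih =>
      intro l res hlen hnd
      cases l with
      | nil => simp [pvLoopB]
      | cons t rest =>
          have htn := hnd t (List.mem_cons_self)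
          have hrest : ∀ u ∈ rest.filter (fun u => !pvDictEq u.2.1 t.2.1),
              (u.2.1.map Prod.fst).Nodup := fun u hu =>
            hnd u (List.mem_cons_of_mem _ (List.mem_of_mem_filter hu))
          have hlen' : (rest.filter (fun u => !pvDictEq u.2.1 t.2.1)).length ≤ n :=
            le_trans (List.length_filter_le _ rest) (Nat.lt_succ_iff.mp hlen)
          rw [pvLoopB, ih _ _ hlen' hrest]
          have hfold : (t :: rest).foldl (fun grupos t => pvUpd t.1 t.2.1 t.2.2 grupos) [] =
              (t.1 + ((rest.filter (fun u => pvDictEq u.2.1 t.2.1)).map Prod.fst).sum,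
                t.2.1, t.2.2)
              :: (rest.filter (fun u => !pvDictEq u.2.1 t.2.1)).foldl
                  (fun grupos t => pvUpd t.1 t.2.1 t.2.2 grupos) [] := by
            have : (t :: rest).foldl (fun grupos t => pvUpd t.1 t.2.1 t.2.2 grupos) [] =
                rest.foldl (fun grupos t => pvUpd t.1 t.2.1 t.2.2 grupos)
                  ((t.1, t.2.1, t.2.2) :: []) := by simp [pvUpd]
            rw [this,
              pvHeadSplit rest (fun u hu => hnd u (List.mem_cons_of_mem _ hu)) [] t.1 t.2.1 t.2.2 htn]
          rw [hfold]
          simp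

-- ===== VERDICT (by name: the statement is the Claim_ definition above) =====
theorem agrupar_resultados_spec : Claim_equal_agrupar_resultados := by
  intro lista _ hpre
  unfold Spec_agrupar_resultados agrupar_resultados agrupar_resultados_alt
  have h := pvFold_inv lista PySem.Dict.empty [] hpre (by simp [pvInv, PySem.Dict.empty])
  have hitems := h.1
  rw [pvLoopB_eq lista.length lista [] le_rfl hpre, List.nil_append]
  simp only [PySem.Dict.values]
  rw [List.map_map]
  exact hitems
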